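-- pv_equiv track=rewrite | github.com/YuriODev/iterations-and-loops-updated-Fadi-Mostefai | exercises/exercise_26.py | intsum
-- ===== SOURCE A (Python) =====
-- def intsum(n):
--     count = 0
--     for num in range(100, 1000):
--         sum = 0
--         while num != 0:
--             last_digit = num % 10
--             num = num // 10
--             sum += last_digit
--         if sum == n:
--             count += 1
--     return count
-- ===== SOURCE B (Python) =====
-- def intsum(n):
--     # Enumerate digit triples directly instead of extracting digits of each number.
--     return sum(1 for h in range(1, 10) for t in range(10) for u in range(10) if h + t + u == n)
-- ===== Notes on version B (the rewrite author's own statement) =====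
-- stated objective: simpler
-- what changed: Replaced the loop over 100..999 with an inner digit-extraction while-loop by a single comprehension over the digit triples (h,t,u) themselves, so no digit extraction happens at all.
import Mathlib
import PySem

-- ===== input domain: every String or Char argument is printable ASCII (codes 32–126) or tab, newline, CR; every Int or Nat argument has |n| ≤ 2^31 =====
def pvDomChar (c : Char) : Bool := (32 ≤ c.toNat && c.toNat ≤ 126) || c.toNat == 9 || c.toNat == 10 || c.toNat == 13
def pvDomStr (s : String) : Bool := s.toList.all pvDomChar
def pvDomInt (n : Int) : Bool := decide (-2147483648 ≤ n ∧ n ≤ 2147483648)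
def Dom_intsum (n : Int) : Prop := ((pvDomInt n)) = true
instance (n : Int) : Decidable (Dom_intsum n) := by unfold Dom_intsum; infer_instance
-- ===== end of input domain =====

-- B enumerates digit triples (h,t,u) directly instead of extracting digits of each number; objective: simpler.

-- ===== PORT A =====
-- inner while-loop: `while num != 0: last_digit = num % 10; num //= 10; sum += last_digit`.
-- num is always a member of range(100,1000), hence positive, so the guard `num != 0` is
-- equivalently written `0 < num`; the Nat fuel (num.toNat at the call site) only bounds the
-- iteration count — the loop always exits on its own guard, exactly as in Python.
def pvDigitLoopF : Nat → Int → Int → Int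
  | 0, _, acc => acc
  | f + 1, num, acc =>
      if 0 < num then
        pvDigitLoopF f (PySem.Int.floordiv num 10) (acc + PySem.Int.mod num 10)
      else acc

def pvDigitLoop (num acc : Int) : Int := pvDigitLoopF num.toNat num acc

def intsum (n : Int) : Int :=
  (PySem.List.pyRange 100 1000 1).foldl
    (fun count num => if pvDigitLoop num 0 == n then count + 1 else count) 0

-- ===== PORT B =====
def intsum_alt (n : Int) : Int :=
  (PySem.List.pyRange 1 10 1).foldl (fun acc h =>
    (PySem.List.pyRange 0 10 1).foldl (fun acc t =>
      (PySem.List.pyRange 0 10 1).foldl (fun acc u =>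
        if h + t + u == n then acc + 1 else acc) acc) acc) 0

-- ===== PRECONDITION & SPEC =====
def Spec_intsum (n : Int) (out : Int) : Prop := out = intsum_alt n
instance (n : Int) (out : Int) : Decidable (Spec_intsum n out) := by unfold Spec_intsum; infer_instance

-- ===== CLAIM (what is proved, stated in full; the proofs are below) =====
def Claim_equal_intsum : Prop := ∀ (n : Int), Dom_intsum n → Spec_intsum n (intsum n)

-- ===== LEMMAS AND PROOFS =====

-- counting fold = List.count on the mapped list
theorem pv_count_fold (f : Int → Int) (n : Int) (L : List Int) (c : Int) :
    L.foldl (fun c x => if f x == n then c + 1 else c) c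
      = c + ((L.map f).count n : Nat) := by
  induction L generalizing c with
  | nil => simp
  | cons a L ih =>
      simp only [List.foldl_cons, List.map_cons, List.count_cons, ih]
      by_cases h : f a == n
      · simp [h, ih]; omega
      · simp [h, ih]

-- the list of digit sums A traverses
def pvLA : List Int := (PySem.List.pyRange 100 1000 1).map (fun num => pvDigitLoop num 0)

-- the list of sums B traverses (flattened triple loops)
def pvLB : List Int :=
  (PySem.List.pyRange 1 10 1).flatMap (fun h =>
    (PySem.List.pyRange 0 10 1).flatMap (fun t =>
      (PySem.List.pyRange 0 10 1).map (fun u => h + t + u)))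

set_option maxRecDepth 8000 in
theorem pv_A_count (n : Int) : intsum n = (pvLA.count n : Nat) := by
  have := pv_count_fold (fun num => pvDigitLoop num 0) n (PySem.List.pyRange 100 1000 1) 0
  simpa [intsum, pvLA] using this

theorem pv_flatMap_fold (g : Int → List Int) (n : Int) (L : List Int) (c : Int)
    (F : Int → Int → Int)
    (hF : ∀ h c, F c h = c + (((g h).count n : Nat) : Int)) :
    L.foldl F c = c + ((L.flatMap g).count n : Nat) := by
  induction L generalizing c with
  | nil => simp
  | cons a L ih =>
      simp only [List.foldl_cons, List.flatMap_cons, List.count_append, ih, hF]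
      push_cast; ring

set_option maxRecDepth 8000 in
theorem pv_B_count (n : Int) : intsum_alt n = (pvLB.count n : Nat) := by
  have h1 : ∀ (h t : Int) (c : Int),
      (PySem.List.pyRange 0 10 1).foldl
        (fun acc u => if h + t + u == n then acc + 1 else acc) c
        = c + ((((PySem.List.pyRange 0 10 1).map (fun u => h + t + u)).count n : Nat) : Int) := by
    intro h t c
    exact pv_count_fold (fun u => h + t + u) n _ c
  have h2 : ∀ (h : Int) (c : Int),
      (PySem.List.pyRange 0 10 1).foldl
        (fun acc t => (PySem.List.pyRange 0 10 1).foldl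
          (fun acc u => if h + t + u == n then acc + 1 else acc) acc) c
        = c + ((((PySem.List.pyRange 0 10 1).flatMap (fun t =>
            (PySem.List.pyRange 0 10 1).map (fun u => h + t + u))).count n : Nat) : Int) := by
    intro h c
    exact pv_flatMap_fold _ n _ c _ (fun t c => h1 h t c)
  have h3 := pv_flatMap_fold
      (fun h => (PySem.List.pyRange 0 10 1).flatMap (fun t =>
        (PySem.List.pyRange 0 10 1).map (fun u => h + t + u)))
      n (PySem.List.pyRange 1 10 1) 0 _ (fun h c => h2 h c)
  simpa [intsum_alt, pvLB] using h3

-- the two concrete lists of sums coincide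
set_option maxRecDepth 100000 in
theorem pv_lists_eq : pvLA = pvLB := by decide

-- ===== VERDICT (by name: the statement is the Claim_ definition above) =====
theorem intsum_spec : Claim_equal_intsum := by
  intro n _
  unfold Spec_intsum
  rw [pv_A_count, pv_B_count, pv_lists_eq]
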